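-- pv_equiv track=rewrite | github.com/changmeng72/leecode_python3 | easy/748-shortest-completing-word.py | searchchar
-- ===== SOURCE A (Python) =====
-- def searchchar(w1:str,w2:str)->bool:
--     cdict = {}
--     for c in w2:
--         cdict[c] = cdict.get(c,0) + 1
--     for c in w1:
--         t = cdict.get(c,0)
--         if(t==0):
--             return False
--         else:
--             cdict[c] = t-1
--     return True
-- ===== SOURCE B (Python) =====
-- def searchchar(w1: str, w2: str) -> bool:
--     # sort both words and walk them with two pointers (merge-style multiset-subset test)
--     a = sorted(w1)
--     b = sorted(w2)
--     i = 0
--     for c in a: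
--         while i < len(b) and b[i] < c:
--             i += 1
--         if i == len(b) or b[i] != c:
--             return False
--         i += 1
--     return True
-- ===== Notes on version B (the rewrite author's own statement) =====
-- stated objective: alternative
-- what changed: Replaces the hash-count-then-consume dictionary algorithm with sorting both strings and a two-pointer linear merge that matches each character of sorted w1 against sorted w2.
import Mathlib
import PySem

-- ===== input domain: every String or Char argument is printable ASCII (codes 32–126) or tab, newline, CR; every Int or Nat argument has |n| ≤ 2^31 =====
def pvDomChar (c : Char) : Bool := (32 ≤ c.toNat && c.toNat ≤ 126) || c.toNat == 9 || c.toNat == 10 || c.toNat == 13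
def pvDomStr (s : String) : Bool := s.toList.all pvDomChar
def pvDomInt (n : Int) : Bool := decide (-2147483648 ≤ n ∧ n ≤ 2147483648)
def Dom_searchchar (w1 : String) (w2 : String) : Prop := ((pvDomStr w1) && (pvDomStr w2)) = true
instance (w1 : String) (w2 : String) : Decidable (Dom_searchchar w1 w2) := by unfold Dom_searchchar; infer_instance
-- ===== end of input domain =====

-- B trades the hash-count-then-consume dictionary for sorting both strings plus a two-pointer merge (alternative decomposition, no speed claim).

-- ===== PORT A =====
-- the second loop of A: walk w1, decrementing counts, early-return False on a missing character
def searchcharLoop : List Char → PySem.Dict Char Int → Bool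
  | [], _ => true
  | c :: cs, d =>
      let t := d.getD c 0
      if t == 0 then false
      else searchcharLoop cs (d.insert c (t - 1))

def searchchar (w1 : String) (w2 : String) : Bool :=
  let cdict := w2.toList.foldl (fun d c => d.insert c (d.getD c 0 + 1)) PySem.Dict.empty
  searchcharLoop w1.toList cdict

-- ===== PORT B =====
-- the two-pointer walk over the two sorted character lists
def mergeLoop : List Char → List Char → Bool
  | [], _ => true
  | _ :: _, [] => false
  | c :: cs, d :: ds =>
      if d < c then mergeLoop (c :: cs) ds
      else if d == c then mergeLoop cs ds
      else false

def searchchar_alt (w1 : String) (w2 : String) : Bool :=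
  mergeLoop (PySem.List.sorted w1.toList (fun x => x) false)
            (PySem.List.sorted w2.toList (fun x => x) false)

-- ===== PRECONDITION & SPEC =====
def Spec_searchchar (w1 : String) (w2 : String) (out : Bool) : Prop := out = searchchar_alt w1 w2
instance (w1 : String) (w2 : String) (out : Bool) : Decidable (Spec_searchchar w1 w2 out) := by unfold Spec_searchchar; infer_instance

-- ===== CLAIM (what is proved, stated in full; the proofs are below) =====
def Claim_equal_searchchar : Prop := ∀ (w1 : String) (w2 : String), Dom_searchchar w1 w2 → Spec_searchchar w1 w2 (searchchar w1 w2)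

-- ===== LEMMAS AND PROOFS =====

-- A's consuming loop succeeds iff each character's count in l fits inside the dict's budget
theorem searchcharLoop_iff (l : List Char) (d : PySem.Dict Char Int)
    (h : ∀ c, 0 ≤ d.getD c 0) :
    searchcharLoop l d = true ↔ ∀ c, (l.count c : Int) ≤ d.getD c 0 := by
  induction l generalizing d with
  | nil => simp only [searchcharLoop, List.count_nil, Int.natCast_zero, true_iff]; exact h
  | cons c cs ih =>
      simp only [searchcharLoop]
      by_cases ht : d.getD c 0 = 0
      · simp only [ht, beq_self_eq_true, if_true]
        constructor
        · intro hfalse; cases hfalse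
        · intro hall
          have := hall c
          rw [ht, List.count_cons_self] at this
          omega
      · have hbne : (d.getD c 0 == 0) = false := by simpa using ht
        simp only [hbne, Bool.false_eq_true, if_false]
        have hpos : 0 < d.getD c 0 := lt_of_le_of_ne (h c) (Ne.symm ht)
        have h' : ∀ e, 0 ≤ (d.insert c (d.getD c 0 - 1)).getD e 0 := by
          intro e
          rw [PySem.Dict.getD_insert]
          split_ifs with he
          · omega
          · exact h e
        rw [ih _ h']
        constructor
        · intro hall e
          have := hall e
          rw [PySem.Dict.getD_insert] at this
          by_cases he : e = c
          · subst he
            rw [if_pos rfl] at this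
            rw [List.count_cons_self]
            push_cast
            omega
          · rw [if_neg he] at this
            rw [List.count_cons_of_ne (fun hh => he hh.symm)]
            exact this
        · intro hall e
          have := hall e
          rw [PySem.Dict.getD_insert]
          by_cases he : e = c
          · subst he
            rw [if_pos rfl]
            rw [List.count_cons_self] at this
            push_cast at this
            omega
          · rw [if_neg he]
            rw [List.count_cons_of_ne (fun hh => he hh.symm)] at this
            exact this

theorem count_eq_zero_of_lt_head (c : Char) (d : Char) (ds : List Char)
    (hp : (d :: ds).Pairwise (· ≤ ·)) (hlt : c < d) : (d :: ds).count c = 0 := by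
  rw [List.count_eq_zero]
  intro hmem
  rcases List.mem_cons.mp hmem with h | h
  · exact absurd h (ne_of_lt hlt)
  · exact absurd (List.rel_of_pairwise_cons hp h) (not_le.mpr hlt)

-- B's merge on sorted lists decides the same multiset-subset condition
theorem mergeLoop_iff (l2 : List Char) : ∀ (l1 : List Char),
    l1.Pairwise (· ≤ ·) → l2.Pairwise (· ≤ ·) →
    (mergeLoop l1 l2 = true ↔ ∀ c, l1.count c ≤ l2.count c) := by
  induction l2 with
  | nil =>
      intro l1 h1 _
      cases l1 with
      | nil => simp [mergeLoop]
      | cons c cs =>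
          simp only [mergeLoop]
          constructor
          · intro hfalse; cases hfalse
          · intro hall
            have := hall c
            rw [List.count_cons_self, List.count_nil] at this
            omega
  | cons d ds ih =>
      intro l1 h1 h2
      cases l1 with
      | nil =>
          simp only [mergeLoop, true_iff]
          intro e; exact Nat.zero_le _
      | cons c cs =>
          simp only [mergeLoop]
          rcases lt_trichotomy d c with hdc | hdc | hdc
          · rw [if_pos hdc, ih (c :: cs) h1 (List.Pairwise.of_cons h2)]
            constructor
            · intro hall e
              have := hall e
              have hle : ds.count e ≤ (d :: ds).count e := by
                rw [List.count_cons]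
                omega
              omega
            · intro hall e
              have := hall e
              by_cases he : e = d
              · subst he
                have hz : (c :: cs).count e = 0 := count_eq_zero_of_lt_head e c cs h1 hdc
                rw [hz]
                exact Nat.zero_le _
              · rw [List.count_cons_of_ne (fun hh => he hh.symm)] at this
                exact this
          · subst hdc
            rw [if_neg (lt_irrefl d), if_pos (beq_self_eq_true d),
                ih cs (List.Pairwise.of_cons h1) (List.Pairwise.of_cons h2)]
            constructor
            · intro hall e
              have := hall e
              rw [List.count_cons, List.count_cons]
              split_ifs <;> omega
            · intro hall e
              have := hall e
              rw [List.count_cons, List.count_cons] at this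
              split_ifs at this <;> omega
          · rw [if_neg (lt_asymm hdc), if_neg (by simp [ne_of_gt hdc])]
            constructor
            · intro hfalse; cases hfalse
            · intro hall
              have := hall c
              have hz : (d :: ds).count c = 0 := count_eq_zero_of_lt_head c d ds h2 hdc
              rw [List.count_cons_self, hz] at this
              omega

theorem searchchar_eq (w1 w2 : String) : searchchar w1 w2 = searchchar_alt w1 w2 := by
  have hA : searchchar w1 w2 = true ↔ ∀ c, w1.toList.count c ≤ w2.toList.count c := by
    unfold searchchar
    rw [PySem.Dict.foldl_insert_getD_add_one_eq_counter]
    rw [searchcharLoop_iff _ _ (by intro c; rw [PySem.Dict.getD_counter]; exact Int.natCast_nonneg _)]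
    constructor
    · intro h c
      have := h c
      rw [PySem.Dict.getD_counter] at this
      exact_mod_cast this
    · intro h c
      rw [PySem.Dict.getD_counter]
      exact_mod_cast h c
  have hB : searchchar_alt w1 w2 = true ↔ ∀ c, w1.toList.count c ≤ w2.toList.count c := by
    unfold searchchar_alt
    rw [mergeLoop_iff _ _ (PySem.List.sorted_pairwise w1.toList (fun x => x))
          (PySem.List.sorted_pairwise w2.toList (fun x => x))]
    constructor
    · intro h c
      have := h c
      rwa [(PySem.List.sorted_perm w1.toList (fun x => x) false).count_eq,
           (PySem.List.sorted_perm w2.toList (fun x => x) false).count_eq] at this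
    · intro h c
      rw [(PySem.List.sorted_perm w1.toList (fun x => x) false).count_eq,
          (PySem.List.sorted_perm w2.toList (fun x => x) false).count_eq]
      exact h c
  by_cases h : ∀ c, w1.toList.count c ≤ w2.toList.count c
  · rw [hA.mpr h, hB.mpr h]
  · cases hAv : searchchar w1 w2 with
    | true => exact absurd (hA.mp hAv) h
    | false =>
        cases hBv : searchchar_alt w1 w2 with
        | true => exact absurd (hB.mp hBv) h
        | false => rfl

-- ===== VERDICT (by name: the statement is the Claim_ definition above) =====
theorem searchchar_spec : Claim_equal_searchchar := by
  intro w1 w2 _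
  unfold Spec_searchchar
  exact searchchar_eq w1 w2
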